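-- pv_equiv track=rewrite | github.com/terry960302/Python-Algorithms | 스터디 7.21/프로그래머스 레벨3 '최고의 집합' - 복사본.py | solution
-- ===== SOURCE A (Python) =====
-- from itertools import combinations as com
--
-- def solution(n, s):
--     L=[]
--     M=[]
--     if n>=s:
--         return [-1]
--     else:
--         for i in range(1,s+1):
--             L.append(i)
--         for j in com(L,n):  #1부터 n까지 들어있는 리스트에서 sCn을 이용해서 그 중에 리스트의 합이 s인 것만 추출해서 M에 저장한다.
--             if sum(j)==s:
--                 M.append(j) #M은 s의 합으로 이루어진 원소가 n개 들어있는 조합들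
--         return list(M[-1])  #M의 원소들 중 맨마지막에 있는 원소의 총 곱이 가장 큼
-- ===== SOURCE B (Python) =====
-- def build(k, rem):
--     # lexicographically greatest strictly increasing k-list of positive
--     # integers summing to rem: take the largest first element that still
--     # leaves room for k-1 strictly larger ones, then recurse on the rest
--     if k <= 0:
--         return []
--     v = (rem - k*(k-1)//2) // k
--     return [v] + build(k-1, rem - v)
--
-- def solution(n, s):
--     if n >= s:
--         return [-1]
--     return build(n, s)
-- ===== Notes on version B (the rewrite author's own statement) =====
-- stated objective: faster
-- what changed: Replaces A's enumeration of all C(s,n) combinations of 1..s (filtering those with sum s and taking the last) by a direct O(n) greedy construction that computes position by position the maximal feasible value of the lexicographically greatest increasing n-tuple summing to s.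
import Mathlib
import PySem

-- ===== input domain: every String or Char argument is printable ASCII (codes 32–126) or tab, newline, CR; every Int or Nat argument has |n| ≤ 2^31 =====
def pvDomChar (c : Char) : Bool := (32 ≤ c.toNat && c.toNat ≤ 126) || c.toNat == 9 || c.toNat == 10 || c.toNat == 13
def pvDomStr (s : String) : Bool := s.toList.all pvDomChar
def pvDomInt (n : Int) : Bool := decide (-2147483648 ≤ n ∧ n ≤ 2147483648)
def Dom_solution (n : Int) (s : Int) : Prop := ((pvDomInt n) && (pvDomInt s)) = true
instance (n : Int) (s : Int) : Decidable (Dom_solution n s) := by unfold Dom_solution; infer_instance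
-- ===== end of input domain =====

-- B replaces A's enumeration of all C(s,n) combinations by an O(n) greedy construction of
-- the lexicographically greatest increasing n-tuple summing to s (equal wherever A returns).

-- ===== PORT A =====
-- itertools.combinations(xs, k): all length-k subsequences of xs, in the order itertools emits them
def combos : Nat → List Int → List (List Int)
  | 0, _ => [[]]
  | _+1, [] => []
  | k+1, x :: xs => (combos k xs).map (fun t => x :: t) ++ combos (k+1) xs

def solution (n : Int) (s : Int) : List Int :=
  if n ≥ s then [-1]
  else
    -- L = [1, …, s]
    let L := PySem.List.pyRange 1 (s+1) 1
    -- M = the combinations of L of size n whose sum is s (n ≥ 1 under Pre_, so n.toNat is exact)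
    let M := (combos n.toNat L).filter (fun j => j.sum == s)
    -- M[-1]; Pre_solution guarantees M ≠ [], so the .getD default is never reached
    (PySem.List.pyGet? M (-1)).getD []

-- ===== PORT B =====
-- build(k, rem) of Source B; the recursion depth is k when k > 0 and 0 otherwise, so the Int
-- recursion is transcribed with fuel k.toNat (the 'if k <= 0: return []' base is fuel 0)
def buildGo : Nat → Int → List Int
  | 0, _ => []
  | k+1, rem =>
    let v := PySem.Int.floordiv (rem - PySem.Int.floordiv (((k:Int)+1)*(((k:Int)+1)-1)) 2) ((k:Int)+1)
    v :: buildGo k (rem - v)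

def build (k : Int) (rem : Int) : List Int := buildGo k.toNat rem

def solution_alt (n : Int) (s : Int) : List Int :=
  if n ≥ s then [-1]
  else build n s

-- ===== PRECONDITION & SPEC =====
-- Pre_ excludes exactly the inputs on which A raises: n < s with n ≤ 0 (ValueError from
-- combinations for n < 0, else IndexError) or with minimal sum 1+…+n > s (M empty, IndexError on M[-1]).
def Pre_solution (n : Int) (s : Int) : Prop := s ≤ n ∨ (1 ≤ n ∧ n*(n+1) ≤ 2*s)
instance (n : Int) (s : Int) : Decidable (Pre_solution n s) := by unfold Pre_solution; infer_instance
def pvWitness_solution : Int × Int := (2, 5)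

def Spec_solution (n : Int) (s : Int) (out : List Int) : Prop := out = solution_alt n s
instance (n : Int) (s : Int) (out : List Int) : Decidable (Spec_solution n s out) := by unfold Spec_solution; infer_instance

-- ===== CLAIM (what is proved, stated in full; the proofs are below) =====
def Claim_equal_solution : Prop := ∀ (n : Int) (s : Int), Dom_solution n s → Pre_solution n s → Spec_solution n s (solution n s)

-- ===== LEMMAS AND PROOFS =====

-- tri k = 1 + 2 + … + k
def tri : Nat → Int
  | 0 => 0
  | k+1 => tri k + (k+1)

lemma two_tri (k : Nat) : 2 * tri k = (k : Int) * (k+1) := by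
  induction k with
  | zero => simp [tri]
  | succ k ih => simp only [tri]; push_cast; push_cast at ih; ring_nf; ring_nf at ih; omega

lemma buildGo_succ (k : Nat) (rem : Int) :
    buildGo (k+1) rem =
      (PySem.Int.floordiv (rem - tri k) ((k:Int)+1)) ::
        buildGo k (rem - PySem.Int.floordiv (rem - tri k) ((k:Int)+1)) := by
  have h2 : PySem.Int.floordiv (((k:Int)+1)*(((k:Int)+1)-1)) 2 = tri k := by
    have he : ((k:Int)+1)*(((k:Int)+1)-1) = 2 * tri k := by rw [two_tri]; ring
    rw [he, PySem.Int.floordiv_eq_ediv_of_pos (by norm_num), Int.mul_ediv_cancel_left _ (by norm_num)]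
  simp only [buildGo, h2]

lemma v_lb (k : Nat) (rem q : Int) (h : q * ((k:Int)+1) ≤ rem - tri k) :
    q ≤ PySem.Int.floordiv (rem - tri k) ((k:Int)+1) :=
  (PySem.Int.le_floordiv_iff_mul_le (by positivity)).mpr h

lemma v_ub (k : Nat) (rem : Int) :
    PySem.Int.floordiv (rem - tri k) ((k:Int)+1) * ((k:Int)+1) ≤ rem - tri k :=
  (PySem.Int.le_floordiv_iff_mul_le (by positivity)).mp le_rfl

lemma buildGo_sum (k : Nat) (rem : Int) : (buildGo (k+1) rem).sum = rem := by
  induction k generalizing rem with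
  | zero =>
      rw [buildGo_succ]
      simp [buildGo, tri]
  | succ k ih =>
      rw [buildGo_succ]
      simp [ih]

lemma buildGo_length (k : Nat) (rem : Int) : (buildGo k rem).length = k := by
  induction k generalizing rem with
  | zero => simp [buildGo]
  | succ k ih => rw [buildGo_succ]; simp [ih]

lemma buildGo_pairwise (k : Nat) : ∀ (a rem : Int), a * k + tri k ≤ rem →
    List.Pairwise (· < ·) (a :: buildGo k rem) := by
  induction k with
  | zero => intro a rem _; simp [buildGo]
  | succ k ih =>
      intro a rem h
      rw [buildGo_succ]
      set v := PySem.Int.floordiv (rem - tri k) ((k:Int)+1) with hv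
      have hav : a + 1 ≤ v := by
        apply v_lb
        simp only [tri] at h
        push_cast at h ⊢
        nlinarith
      have hrec : v * (k:Int) + tri k ≤ rem - v := by
        have := v_ub k rem
        rw [← hv] at this
        nlinarith
      have hP := ih v (rem - v) hrec
      rw [List.pairwise_cons] at hP ⊢
      obtain ⟨hvall, hPtail⟩ := hP
      refine ⟨?_, ?_⟩
      · intro x hx
        rcases List.mem_cons.mp hx with rfl | hx
        · omega
        · exact lt_trans (by omega) (hvall x hx)
      · rw [List.pairwise_cons]; exact ⟨hvall, hPtail⟩

lemma sum_lb : ∀ (ys : List Int) (b : Int), ys.Pairwise (· < ·) → (∀ x ∈ ys, b < x) →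
    b * ys.length + tri ys.length ≤ ys.sum := by
  intro ys
  induction ys with
  | nil => intro b _ _; simp [tri]
  | cons c ys ih =>
      intro b hp hb
      rw [List.pairwise_cons] at hp
      obtain ⟨hc, hp'⟩ := hp
      have hIH := ih c hp' hc
      have hbc : b + 1 ≤ c := hb c (List.mem_cons_self)
      have hlen : (0:Int) ≤ (ys.length : Int) := by positivity
      simp only [List.length_cons, List.sum_cons, tri]
      push_cast
      push_cast at hIH
      nlinarith

lemma lex_le_build (k : Nat) : ∀ (rem : Int) (y : List Int), y.Pairwise (· < ·) →
    y.length = k → y.sum = rem →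
    y = buildGo k rem ∨ List.Lex (· < ·) y (buildGo k rem) := by
  induction k with
  | zero =>
      intro rem y _ hl _
      left
      simp [buildGo, List.length_eq_zero_iff.mp hl]
  | succ k ih =>
      intro rem y hp hl hs
      cases y with
      | nil => simp at hl
      | cons b ys =>
          rw [buildGo_succ]
          set v := PySem.Int.floordiv (rem - tri k) ((k:Int)+1) with hv
          rw [List.pairwise_cons] at hp
          obtain ⟨hball, hp'⟩ := hp
          have hlen : ys.length = k := by simpa using hl
          have hsum : ys.sum = rem - b := by simp at hs; omega
          have hbv : b ≤ v := by
            apply v_lb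
            have := sum_lb ys b hp' hball
            rw [hlen, hsum] at this
            nlinarith
          rcases lt_or_eq_of_le hbv with hlt | heq
          · right; exact List.Lex.rel hlt
          · rcases ih (rem - b) ys hp' hlen hsum with he | hlex
            · left; rw [he, heq]
            · right
              rw [heq]
              rw [heq] at hlex
              exact List.Lex.cons hlex

lemma mem_combos_iff : ∀ (xs : List Int) (k : Nat) (y : List Int),
    y ∈ combos k xs ↔ y.Sublist xs ∧ y.length = k := by
  intro xs
  induction xs with
  | nil =>
      intro k y
      cases k with
      | zero =>
          simp only [combos, List.mem_singleton, List.sublist_nil]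
          constructor
          · rintro rfl; simp
          · rintro ⟨rfl, _⟩; rfl
      | succ k =>
          simp only [combos, List.not_mem_nil, false_iff, List.sublist_nil]
          rintro ⟨rfl, hl⟩; simp at hl
  | cons x xs ih =>
      intro k y
      cases k with
      | zero =>
          simp only [combos, List.mem_singleton]
          constructor
          · rintro rfl; simp
          · rintro ⟨_, hl⟩; exact List.length_eq_zero_iff.mp hl
      | succ k =>
          simp only [combos, List.mem_append, List.mem_map]
          constructor
          · rintro (⟨t, ht, rfl⟩ | hy)
            · obtain ⟨hsub, hlen⟩ := (ih k t).mp ht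
              exact ⟨hsub.cons₂ x, by simp [hlen]⟩
            · obtain ⟨hsub, hlen⟩ := (ih (k+1) y).mp hy
              exact ⟨hsub.cons x, hlen⟩
          · rintro ⟨hsub, hlen⟩
            cases hsub with
            | cons _ h => exact Or.inr ((ih (k+1) y).mpr ⟨h, hlen⟩)
            | cons₂ _ h =>
                left
                rename_i t
                exact ⟨t, (ih k t).mpr ⟨h, by simpa using hlen⟩, rfl⟩

lemma combos_ne_nil_mem (k : Nat) (xs y : List Int) (hy : y ∈ combos (k+1) xs) :
    ∃ c ys, y = c :: ys ∧ c ∈ xs := by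
  obtain ⟨hsub, hlen⟩ := (mem_combos_iff xs (k+1) y).mp hy
  cases y with
  | nil => simp at hlen
  | cons c ys => exact ⟨c, ys, rfl, hsub.subset List.mem_cons_self⟩

lemma combos_pairwise_lex : ∀ (xs : List Int), xs.Pairwise (· < ·) → ∀ (k : Nat),
    (combos k xs).Pairwise (fun u w => List.Lex (· < ·) u w) := by
  intro xs
  induction xs with
  | nil =>
      intro _ k
      cases k <;> simp [combos]
  | cons x xs ih =>
      intro h k
      rw [List.pairwise_cons] at h
      obtain ⟨hx, hxs⟩ := h
      cases k with
      | zero => simp [combos]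
      | succ k =>
          simp only [combos]
          rw [List.pairwise_append]
          refine ⟨?_, ih hxs (k+1), ?_⟩
          · rw [List.pairwise_map]
            exact (ih hxs k).imp (fun h => List.Lex.cons h)
          · rintro u hu w hw
            obtain ⟨t, ht, rfl⟩ := List.mem_map.mp hu
            obtain ⟨c, ws, rfl, hc⟩ := combos_ne_nil_mem k xs w hw
            exact List.Lex.rel (hx c hc)

lemma sorted_sublist_range_aux (s : Int) : ∀ (t : Nat) (a : Int) (l : List Int),
    (s - a).toNat ≤ t → l.Pairwise (· < ·) → (∀ x ∈ l, a < x ∧ x ≤ s) →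
    l.Sublist (PySem.List.pyRange (a+1) (s+1) 1) := by
  intro t
  induction t with
  | zero =>
      intro a l hle _ hb
      cases l with
      | nil => exact List.nil_sublist _
      | cons x l' =>
          have := hb x List.mem_cons_self
          omega
  | succ t ih =>
      intro a l hle hp hb
      cases l with
      | nil => exact List.nil_sublist _
      | cons x l' =>
          have hx := hb x List.mem_cons_self
          rw [PySem.List.pyRange_one_cons (by omega)]
          rw [List.pairwise_cons] at hp
          obtain ⟨hxall, hp'⟩ := hp
          by_cases hxa : x = a + 1
          · subst hxa
            apply List.Sublist.cons₂
            apply ih (a+1) l' (by omega) hp'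
            intro z hz
            exact ⟨hxall z hz, (hb z (List.mem_cons_of_mem _ hz)).2⟩
          · apply List.Sublist.cons
            apply ih (a+1) (x :: l') (by omega) (List.pairwise_cons.mpr ⟨hxall, hp'⟩)
            intro z hz
            rcases List.mem_cons.mp hz with rfl | hz'
            · exact ⟨by omega, hx.2⟩
            · exact ⟨lt_trans (by omega) (hxall z hz'), (hb z (List.mem_cons_of_mem _ hz')).2⟩

lemma lex_irrefl : ∀ (l : List Int), ¬ List.Lex (· < ·) l l := by
  intro l
  induction l with
  | nil => intro h; cases h
  | cons x l ih =>
      intro h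
      cases h with
      | rel h => exact lt_irrefl _ h
      | cons h => exact ih h

lemma lex_asymm : ∀ (u w : List Int), List.Lex (· < ·) u w → List.Lex (· < ·) w u → False := by
  intro u
  induction u with
  | nil => intro w _ h2; cases h2
  | cons a u' ih =>
      intro w h1 h2
      cases h1 with
      | rel h => cases h2 with
          | rel h' => exact absurd h (not_lt.mpr (le_of_lt h'))
          | cons _ => exact lt_irrefl _ h
      | cons h => cases h2 with
          | rel h' => exact lt_irrefl _ h'
          | cons h' => exact ih _ h h'

lemma getLast?_eq_of_max {α : Type} {R : α → α → Prop} : ∀ (l : List α) (g : α),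
    l.Pairwise R → g ∈ l → (∀ y ∈ l, ¬ R g y) → l.getLast? = some g := by
  intro l
  induction l with
  | nil => intro g _ hg _; simp at hg
  | cons x l ih =>
      intro g hp hg hmax
      rw [List.pairwise_cons] at hp
      obtain ⟨hR, hp'⟩ := hp
      rcases List.mem_cons.mp hg with rfl | hg'
      · cases l with
        | nil => rfl
        | cons y l' =>
            exact absurd (hR y List.mem_cons_self)
              (hmax y (List.mem_cons_of_mem _ List.mem_cons_self))
      · cases l with
        | nil => simp at hg'
        | cons y l' =>
            rw [List.getLast?_cons_cons]
            exact ih g hp' hg' (fun z hz => hmax z (List.mem_cons_of_mem _ hz))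

-- ===== VERDICT (by name: the statement is the Claim_ definition above) =====
theorem solution_spec : Claim_equal_solution := by
  intro n s _ hPre
  unfold Spec_solution solution solution_alt
  by_cases hns : n ≥ s
  · simp [hns]
  · simp only [if_neg hns, ge_iff_le, not_le] at *
    obtain ⟨h1, h2⟩ : 1 ≤ n ∧ n*(n+1) ≤ 2*s := by
      rcases hPre with h | h
      · omega
      · exact h
    obtain ⟨k', hk'⟩ : ∃ k', n.toNat = k' + 1 := ⟨n.toNat - 1, by omega⟩
    have hk : ((k' + 1 : Nat) : Int) = n := by rw [← hk']; exact Int.toNat_of_nonneg (by omega)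
    have hbuild : build n s = buildGo (k'+1) s := by unfold build; rw [hk']
    rw [hk', hbuild]
    have htri : tri (k'+1) ≤ s := by
      have h2t := two_tri (k'+1)
      rw [hk] at h2t
      omega
    have hPW := buildGo_pairwise (k'+1) 0 s (by simpa using htri)
    rw [List.pairwise_cons] at hPW
    obtain ⟨hg_pos, hg_pw⟩ := hPW
    have hsum : (buildGo (k'+1) s).sum = s := buildGo_sum k' s
    have hlen : (buildGo (k'+1) s).length = k' + 1 := buildGo_length (k'+1) s
    have hub : ∀ x ∈ buildGo (k'+1) s, x ≤ s := by
      intro x hx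
      have := List.single_le_sum (fun y hy => le_of_lt (hg_pos y hy)) x hx
      omega
    have hsub : (buildGo (k'+1) s).Sublist (PySem.List.pyRange 1 (s+1) 1) := by
      have := sorted_sublist_range_aux s (s - 0).toNat 0 (buildGo (k'+1) s) le_rfl hg_pw
        (fun x hx => ⟨hg_pos x hx, hub x hx⟩)
      simpa using this
    have hgM : buildGo (k'+1) s ∈ (combos (k'+1) (PySem.List.pyRange 1 (s+1) 1)).filter (fun j => j.sum == s) := by
      rw [List.mem_filter]
      exact ⟨(mem_combos_iff _ _ _).mpr ⟨hsub, hlen⟩, by simp [hsum]⟩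
    have hMpw := (combos_pairwise_lex _ (PySem.List.pairwise_lt_pyRange_one 1 (s+1)) (k'+1)).filter
      (fun j => j.sum == s)
    have hmax : ∀ y ∈ (combos (k'+1) (PySem.List.pyRange 1 (s+1) 1)).filter (fun j => j.sum == s),
        ¬ List.Lex (· < ·) (buildGo (k'+1) s) y := by
      intro y hy hLex
      rw [List.mem_filter] at hy
      obtain ⟨hyc, hys⟩ := hy
      obtain ⟨hysub, hylen⟩ := (mem_combos_iff _ _ _).mp hyc
      have hysum : y.sum = s := by simpa using hys
      have hypw : y.Pairwise (· < ·) :=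
        (PySem.List.pairwise_lt_pyRange_one 1 (s+1)).sublist hysub
      rcases lex_le_build (k'+1) s y hypw hylen hysum with rfl | hyl
      · exact lex_irrefl _ hLex
      · exact lex_asymm _ _ hyl hLex
    have hlast := getLast?_eq_of_max _ (buildGo (k'+1) s) hMpw hgM hmax
    rw [PySem.List.pyGet?_neg_one, hlast]
    rfl
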